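-- pv_equiv track=rewrite | github.com/zippy731/unbender | unbender.py | select_face_with_fewest_edges_in_path
-- ===== SOURCE A (Python) =====
-- def select_face_with_fewest_edges_in_path(faces, path, face_to_edges):
--     """
--     From a list of faces, select the one that has the fewest edges
--     already in the path. Break ties using lowest face index.
--     """
--     face_scores = []
--
--     for face_idx in faces:
--         # Count how many edges of this face are already in the path
--         face_edges = face_to_edges[face_idx]
--         used_edges = sum(1 for e in face_edges if e in path["edges"])
--         face_scores.append((used_edges, face_idx))
--
--     # Sort by used edges, then by face index
--     face_scores.sort()
--     return face_scores[0][1] if face_scores else None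
-- ===== SOURCE B (Python) =====
-- def select_face_with_fewest_edges_in_path(faces, path, face_to_edges):
--     """
--     Single-pass running argmin over (used_edges, face_idx) instead of
--     building a score list and sorting it.
--     """
--     best = None
--     for face_idx in faces:
--         used_edges = sum(1 for e in face_to_edges[face_idx] if e in path["edges"])
--         if best is None or (used_edges, face_idx) < best:
--             best = (used_edges, face_idx)
--     return best[1] if best is not None else None
-- ===== Notes on version B (the rewrite author's own statement) =====
-- stated objective: alternative
-- what changed: Replaces building a (used_edges, face_idx) score list and sorting it with a single linear running-argmin pass that keeps only the current best tuple.
import Mathlib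
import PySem

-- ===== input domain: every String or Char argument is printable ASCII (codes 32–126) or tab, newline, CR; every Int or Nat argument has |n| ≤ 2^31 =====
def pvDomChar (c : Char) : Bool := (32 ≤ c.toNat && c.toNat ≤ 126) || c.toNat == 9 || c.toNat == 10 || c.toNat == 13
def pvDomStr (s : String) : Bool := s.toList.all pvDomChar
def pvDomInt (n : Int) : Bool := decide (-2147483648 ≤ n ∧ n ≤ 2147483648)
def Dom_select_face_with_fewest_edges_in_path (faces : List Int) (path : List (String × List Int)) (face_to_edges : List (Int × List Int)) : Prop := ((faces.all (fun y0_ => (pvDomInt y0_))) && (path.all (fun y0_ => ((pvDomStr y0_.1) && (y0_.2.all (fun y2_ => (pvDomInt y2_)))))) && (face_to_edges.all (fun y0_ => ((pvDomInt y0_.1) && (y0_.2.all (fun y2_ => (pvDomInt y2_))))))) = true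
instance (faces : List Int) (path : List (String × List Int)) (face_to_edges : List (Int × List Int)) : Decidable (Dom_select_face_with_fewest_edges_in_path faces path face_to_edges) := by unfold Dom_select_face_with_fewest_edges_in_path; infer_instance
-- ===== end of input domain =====

-- B replaces A's build-score-list-then-sort with a single running-argmin pass; same result (return-value equivalence).


-- ===== PORT A =====
-- shared transliteration of the identical expression in both Pythons:
--   sum(1 for e in face_to_edges[face_idx] if e in path["edges"])
-- dict lookups are first-match List.lookup; the .getD [] default is never observed inside Pre_
def usedEdgeCount (path : List (String × List Int)) (face_to_edges : List (Int × List Int)) (face_idx : Int) : Int :=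
  ((List.lookup face_idx face_to_edges).getD []).foldl
    (fun s e => if ((List.lookup "edges" path).getD []).contains e then s + 1 else s) 0

def select_face_with_fewest_edges_in_path (faces : List Int) (path : List (String × List Int)) (face_to_edges : List (Int × List Int)) : Option Int :=
  let face_scores : List (Int × Int) :=
    faces.foldl (fun acc face_idx => acc ++ [(usedEdgeCount path face_to_edges face_idx, face_idx)]) []
  -- face_scores.sort() on tuples = lexicographic sort
  match PySem.List.sorted2 face_scores (·.1) (·.2) with
  | [] => none
  | (_, f) :: _ => some f

-- ===== PORT B =====
def select_face_with_fewest_edges_in_path_alt (faces : List Int) (path : List (String × List Int)) (face_to_edges : List (Int × List Int)) : Option Int :=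
  let best : Option (Int × Int) :=
    faces.foldl (fun best face_idx =>
      let used_edges := usedEdgeCount path face_to_edges face_idx
      match best with
      | none => some (used_edges, face_idx)
      -- Python's lexicographic tuple <: (used, idx) < b  ↔  used < b.1 ∨ (used = b.1 ∧ idx < b.2)
      | some b => if used_edges < b.1 || (used_edges == b.1 && face_idx < b.2)
                  then some (used_edges, face_idx) else some b) none
  best.map (·.2)

-- ===== PRECONDITION & SPEC =====
-- Pre_: exactly the inputs on which the Python A returns: every face index is a key of
-- face_to_edges, and whenever a face has a nonempty edge list, "edges" is a key of path
-- (otherwise A raises KeyError).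
def Pre_select_face_with_fewest_edges_in_path (faces : List Int) (path : List (String × List Int)) (face_to_edges : List (Int × List Int)) : Prop :=
  ∀ f ∈ faces, (List.lookup f face_to_edges).isSome ∧
    ((List.lookup f face_to_edges).getD [] = [] ∨ (List.lookup "edges" path).isSome)
instance (faces : List Int) (path : List (String × List Int)) (face_to_edges : List (Int × List Int)) : Decidable (Pre_select_face_with_fewest_edges_in_path faces path face_to_edges) := by unfold Pre_select_face_with_fewest_edges_in_path; infer_instance

def pvWitness_select_face_with_fewest_edges_in_path : List Int × (List (String × List Int)) × (List (Int × List Int)) :=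
  ([0, 1], [("edges", [5])], [(0, [5, 3]), (1, [])])

def Spec_select_face_with_fewest_edges_in_path (faces : List Int) (path : List (String × List Int)) (face_to_edges : List (Int × List Int)) (out : Option Int) : Prop := out = select_face_with_fewest_edges_in_path_alt faces path face_to_edges
instance (faces : List Int) (path : List (String × List Int)) (face_to_edges : List (Int × List Int)) (out : Option Int) : Decidable (Spec_select_face_with_fewest_edges_in_path faces path face_to_edges out) := by unfold Spec_select_face_with_fewest_edges_in_path; infer_instance

-- ===== CLAIM (what is proved, stated in full; the proofs are below) =====
def Claim_equal_select_face_with_fewest_edges_in_path : Prop := ∀ (faces : List Int) (path : List (String × List Int)) (face_to_edges : List (Int × List Int)), Dom_select_face_with_fewest_edges_in_path faces path face_to_edges → Pre_select_face_with_fewest_edges_in_path faces path face_to_edges → Spec_select_face_with_fewest_edges_in_path faces path face_to_edges (select_face_with_fewest_edges_in_path faces path face_to_edges)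

-- ===== LEMMAS AND PROOFS =====

-- the head of an insertion step depends only on the old head
theorem head?_insertBy {α : Type} (before : α → α → Bool) (x : α) (acc : List α) :
    (PySem.List.insertBy before x acc).head? =
      some (match acc.head? with | none => x | some y => if before x y then x else y) := by
  cases acc with
  | nil => simp [PySem.List.insertBy]
  | cons y ys =>
    by_cases h : before x y = true <;> simp [PySem.List.insertBy, h]

-- the head of an insertion-sort fold is the running lexicographic minimum
theorem head?_foldl_insertBy {α : Type} (before : α → α → Bool) (xs : List α) (acc : List α) :
    (xs.foldl (fun a x => PySem.List.insertBy before x a) acc).head? =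
      xs.foldl (fun o x =>
        some (match o with | none => x | some y => if before x y then x else y)) acc.head? := by
  induction xs generalizing acc with
  | nil => rfl
  | cons x t ih => simp only [List.foldl_cons, ih, head?_insertBy]

-- the two lexicographic tests agree on Int
theorem before_eq (u b1 i b2 : Int) :
    (decide (u < b1) || (!decide (b1 < u) && decide (i < b2))) =
    (u < b1 || (u == b1 && i < b2)) := by
  by_cases h1 : u < b1 <;> by_cases h2 : b1 < u <;> simp [h1, h2] <;> omega

theorem head?_match (l : List (Int × Int)) :
    (match l with | [] => (none : Option Int) | (_, f) :: _ => some f) = l.head?.map (·.2) := by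
  cases l with
  | nil => rfl
  | cons h t => rfl

-- ===== VERDICT (by name: the statement is the Claim_ definition above) =====
theorem select_face_with_fewest_edges_in_path_spec : Claim_equal_select_face_with_fewest_edges_in_path := by
  intro faces path face_to_edges _ _
  unfold Spec_select_face_with_fewest_edges_in_path
  unfold select_face_with_fewest_edges_in_path select_face_with_fewest_edges_in_path_alt
  simp only [PySem.List.foldl_append_singleton_eq_map, List.nil_append,
    PySem.List.sorted2, head?_match, if_neg (by decide : ¬ (false = true))]
  rw [head?_foldl_insertBy]
  simp only [List.head?_nil, List.foldl_map]
  congr 1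
  apply PySem.List.foldl_congr_mem
  intro o f _
  cases o with
  | none => rfl
  | some b =>
    simp only [before_eq]
    by_cases h : ((usedEdgeCount path face_to_edges f < b.1 || (usedEdgeCount path face_to_edges f == b.1 && f < b.2)) = true) <;>
      simp [h]
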